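-- pv_equiv track=rewrite | github.com/JakubKazimierski/PythonPortfolio | ABCheck/ABCheck.py | ABCheck
-- ===== SOURCE A (Python) =====
-- def ABCheck(strParam):
--
--   '''
--   Have the function ABCheck(strParam)
--   take the str parameter being passed
--   and return the string true if the characters
--   a and b are separated by exactly 3 places anywhere
--   in the string at least once
--   (ie. "lane borrowed" would result in true because
--   there is exactly three characters between a and b).
--   Otherwise return the string false.
--   '''
--
--   if type(strParam) == str and len(strParam) > 3:
--
--     equalizedLettersString = strParam.lower()
--
--     for letterIndex in range(0, len(equalizedLettersString)-4):
--
--       if equalizedLettersString[letterIndex] == 'a' and equalizedLettersString[letterIndex+4] == 'b':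
--         return "true"
--
--       if equalizedLettersString[letterIndex] == 'b' and equalizedLettersString[letterIndex+4] == 'a':
--         return 'true'
--
--     # complexity of above is O(n)
--     return 'false'
--
--   else:
--     return -1
-- ===== SOURCE B (Python) =====
-- def ABCheck(strParam):
--     if type(strParam) == str and len(strParam) > 3:
--         s = strParam.lower()
--         a_pos = {i for i, c in enumerate(s) if c == 'a'}
--         b_pos = {i for i, c in enumerate(s) if c == 'b'}
--         return "true" if any(i + 4 in b_pos or i - 4 in b_pos for i in a_pos) else "false"
--     return -1
-- ===== Notes on version B (the rewrite author's own statement) =====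
-- stated objective: alternative
-- what changed: Instead of scanning offset-4 character pairs, B first builds the index sets of all 'a's and all 'b's in one enumerate pass each, then asks whether some a-index has a b-index exactly 4 away (in either direction) by set membership.
-- outside the precondition, e.g. on ABCheck('ab'): A returns -1, B returns -1
import Mathlib
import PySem

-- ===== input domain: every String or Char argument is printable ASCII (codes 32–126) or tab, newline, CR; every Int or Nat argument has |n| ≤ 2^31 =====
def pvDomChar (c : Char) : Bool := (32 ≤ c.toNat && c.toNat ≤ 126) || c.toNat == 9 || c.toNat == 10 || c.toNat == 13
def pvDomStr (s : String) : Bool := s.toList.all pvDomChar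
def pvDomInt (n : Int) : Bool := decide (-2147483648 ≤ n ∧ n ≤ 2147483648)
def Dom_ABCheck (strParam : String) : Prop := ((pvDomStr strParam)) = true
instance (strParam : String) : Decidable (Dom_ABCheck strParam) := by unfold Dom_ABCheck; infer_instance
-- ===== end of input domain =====

-- B replaces A's offset-4 pair scan with a staged approach: build the index sets of 'a' and 'b',
-- then test by set membership whether some a-index has a b-index exactly 4 away; alternative, same O(n).

-- ===== PORT A =====
def ABCheck_loop (l : List Char) : List Int → String
  | [] => "false"
  | i :: rest =>
    if PySem.List.pyGet? l i == some 'a' && PySem.List.pyGet? l (i + 4) == some 'b' then "true"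
    else if PySem.List.pyGet? l i == some 'b' && PySem.List.pyGet? l (i + 4) == some 'a' then "true"
    else ABCheck_loop l rest

def ABCheck (strParam : String) : String :=
  if PySem.Str.len strParam > 3 then
    let equalized := PySem.Str.lower strParam
    ABCheck_loop equalized.toList (PySem.List.pyRange 0 (PySem.Str.len equalized - 4) 1)
  else "false"  -- Python returns -1 here (an int, not a str): excluded by Pre_ABCheck

-- ===== PORT B =====
-- {i for i, c in enumerate(s) if c == ch}
def ABCheck_posSet (l : List Char) (ch : Char) : PySem.Set Int :=
  PySem.Set.ofList ((PySem.List.enumerate l).filterMap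
    (fun p => if p.2 == ch then some p.1 else none))

def ABCheck_alt (strParam : String) : String :=
  if PySem.Str.len strParam > 3 then
    let s := (PySem.Str.lower strParam).toList
    let aPos := ABCheck_posSet s 'a'
    let bPos := ABCheck_posSet s 'b'
    if aPos.any (fun i => PySem.Set.contains bPos (i + 4) || PySem.Set.contains bPos (i - 4))
    then "true" else "false"
  else "false"  -- Python returns -1 here (an int, not a str): excluded by Pre_ABCheck

-- ===== PRECONDITION & SPEC =====
-- Pre_ excludes strings of length ≤ 3, on which A returns the int -1, not a value of the declared str type.
def Pre_ABCheck (strParam : String) : Prop := 3 < PySem.Str.len strParam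
instance (strParam : String) : Decidable (Pre_ABCheck strParam) := by unfold Pre_ABCheck; infer_instance
def pvWitness_ABCheck : String := "lane borrowed"

def Spec_ABCheck (strParam : String) (out : String) : Prop := out = ABCheck_alt strParam
instance (strParam : String) (out : String) : Decidable (Spec_ABCheck strParam out) := by unfold Spec_ABCheck; infer_instance

-- ===== CLAIM =====
def Claim_equal_ABCheck : Prop := ∀ (strParam : String), Dom_ABCheck strParam → Pre_ABCheck strParam → Spec_ABCheck strParam (ABCheck strParam)

-- ===== LEMMAS AND PROOFS =====

lemma ABCheck_loop_eq_any (l : List Char) (R : List Int) :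
    ABCheck_loop l R =
      if R.any (fun i =>
          (PySem.List.pyGet? l i == some 'a' && PySem.List.pyGet? l (i + 4) == some 'b') ||
          (PySem.List.pyGet? l i == some 'b' && PySem.List.pyGet? l (i + 4) == some 'a')) then
        "true" else "false" := by
  induction R with
  | nil => simp [ABCheck_loop]
  | cons i rest ih =>
    simp only [ABCheck_loop, List.any_cons, ih]
    by_cases h1 : (PySem.List.pyGet? l i == some 'a' && PySem.List.pyGet? l (i + 4) == some 'b') = true
    · simp [h1]
    · by_cases h2 : (PySem.List.pyGet? l i == some 'b' && PySem.List.pyGet? l (i + 4) == some 'a') = true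
      · simp [h1, h2]
      · simp [h1, h2]

lemma mem_posSet (l : List Char) (ch : Char) (i : Int) :
    i ∈ ABCheck_posSet l ch ↔ ∃ (k : Nat) (h : k < l.length), i = (k : Int) ∧ l[k] = ch := by
  simp only [ABCheck_posSet, PySem.Set.mem_ofList, List.mem_filterMap,
    PySem.List.mem_enumerate_iff]
  constructor
  · rintro ⟨p, ⟨k, hk, rfl⟩, hp⟩
    simp only [zero_add] at hp
    by_cases hc : l[k] = ch
    · exact ⟨k, hk, by simp [hc] at hp; omega, hc⟩
    · simp [hc] at hp
  · rintro ⟨k, hk, rfl, hc⟩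
    exact ⟨((k : Int), l[k]), ⟨k, hk, by simp⟩, by simp [hc]⟩

lemma range_any_eq_set_any (l : List Char) :
    (PySem.List.pyRange 0 ((l.length : Int) - 4) 1).any (fun i =>
        (PySem.List.pyGet? l i == some 'a' && PySem.List.pyGet? l (i + 4) == some 'b') ||
        (PySem.List.pyGet? l i == some 'b' && PySem.List.pyGet? l (i + 4) == some 'a')) =
      (ABCheck_posSet l 'a').any (fun i =>
        PySem.Set.contains (ABCheck_posSet l 'b') (i + 4) ||
        PySem.Set.contains (ABCheck_posSet l 'b') (i - 4)) := by
  apply Bool.eq_iff_iff.mpr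
  simp only [List.any_eq_true, PySem.Set.contains_eq_listContains, Bool.or_eq_true,
    List.contains_iff_mem, Bool.and_eq_true, beq_iff_eq]
  constructor
  · rintro ⟨i, hi, hp⟩
    rw [PySem.List.mem_pyRange_one] at hi
    obtain ⟨hi0, hiu⟩ := hi
    rw [PySem.List.pyGet?_eq_some_getElem l hi0 (by omega),
        PySem.List.pyGet?_eq_some_getElem l (by omega) (by omega)] at hp
    simp only [Option.some.injEq] at hp
    have h44 : (i + 4).toNat = i.toNat + 4 := by omega
    simp only [h44] at hp
    rcases hp with ⟨ha, hb⟩ | ⟨hb, ha⟩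
    · refine ⟨i, (mem_posSet l 'a' i).mpr ⟨i.toNat, by omega, by omega, ha⟩, Or.inl ?_⟩
      exact (mem_posSet l 'b' (i + 4)).mpr ⟨i.toNat + 4, by omega, by omega, hb⟩
    · refine ⟨i + 4, (mem_posSet l 'a' (i + 4)).mpr ⟨i.toNat + 4, by omega, by omega, ha⟩, Or.inr ?_⟩
      have hsub : i + 4 - 4 = i := by ring
      rw [hsub]
      exact (mem_posSet l 'b' i).mpr ⟨i.toNat, by omega, by omega, hb⟩
  · rintro ⟨i, ha, hb | hb⟩
    · obtain ⟨k, hk, rfl, hka⟩ := (mem_posSet l 'a' i).mp ha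
      obtain ⟨m, hm, hmeq, hmb⟩ := (mem_posSet l 'b' _).mp hb
      have hmk : m = k + 4 := by omega
      refine ⟨(k : Int), PySem.List.mem_pyRange_one.mpr ⟨by omega, by omega⟩, ?_⟩
      rw [PySem.List.pyGet?_eq_some_getElem l (by omega) (by omega),
          PySem.List.pyGet?_eq_some_getElem l (by omega) (by omega)]
      have h44 : ((k : Int) + 4).toNat = k + 4 := by omega
      simp only [h44, Int.toNat_natCast, Option.some.injEq]
      exact Or.inl ⟨hka, by subst hmk; exact hmb⟩
    · obtain ⟨k, hk, rfl, hka⟩ := (mem_posSet l 'a' i).mp ha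
      obtain ⟨m, hm, hmeq, hmb⟩ := (mem_posSet l 'b' _).mp hb
      have hmk : k = m + 4 := by omega
      refine ⟨(m : Int), PySem.List.mem_pyRange_one.mpr ⟨by omega, by omega⟩, ?_⟩
      rw [PySem.List.pyGet?_eq_some_getElem l (by omega) (by omega),
          PySem.List.pyGet?_eq_some_getElem l (by omega) (by omega)]
      have h44 : ((m : Int) + 4).toNat = m + 4 := by omega
      simp only [h44, Int.toNat_natCast, Option.some.injEq]
      exact Or.inr ⟨hmb, by subst hmk; exact hka⟩

-- ===== VERDICT =====
theorem ABCheck_spec : Claim_equal_ABCheck := by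
  intro s _ hpre
  unfold Spec_ABCheck ABCheck ABCheck_alt
  have hpre' : (3 : Int) < PySem.Str.len s := hpre
  rw [if_pos hpre', if_pos hpre']
  have hlen : PySem.Str.len (PySem.Str.lower s) = ((PySem.Str.lower s).toList.length : Int) := by
    simp [PySem.Str.len_eq]
  rw [ABCheck_loop_eq_any, hlen, range_any_eq_set_any]
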